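-- pv_equiv track=rewrite | github.com/zavik001/contest-coding | differentСontests/4/MainC.py | calculate_mod
-- ===== SOURCE A (Python) =====
-- import math
--
-- def calculate_mod(n, mod=10 ** 9 + 7):
--     result = 0
--     for k in range(n):
--         sign = (-1) ** k
--
--         binomial1 = math.comb(n - 1, k)
--
--         exponent = math.comb(n - 1 - k, 2)
--         power = pow(2, exponent, mod)
--
--         term = sign * binomial1 * power
--         result = (result + term) % mod
--
--     result = (result * n) % mod
--     return result
-- ===== SOURCE B (Python) =====
-- def calculate_mod(n, mod=10 ** 9 + 7):
--     # One pass with incremental updates: comb = C(n-1, m) kept exactly,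
--     # power = 2^C(m,2) mod `mod` updated by multiplying 2^m each step
--     # (iterating m = n-1-k, i.e. A's sum read back-to-front).
--     result = 0
--     comb = 1
--     power = 1
--     for m in range(n):
--         sign = -1 if (n - 1 - m) % 2 else 1
--         result = (result + sign * comb * power) % mod
--         comb = comb * (n - 1 - m) // (m + 1)
--         power = power * pow(2, m, mod) % mod
--     return result * n % mod
-- ===== Notes on version B (the rewrite author's own statement) =====
-- stated objective: faster
-- what changed: Instead of recomputing math.comb and a huge-exponent modular power from scratch each iteration, B runs one pass in reversed index order maintaining the binomial coefficient and the power of two incrementally (comb updated by one exact multiply/divide, power by multiplying 2^m mod p).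
import Mathlib
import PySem

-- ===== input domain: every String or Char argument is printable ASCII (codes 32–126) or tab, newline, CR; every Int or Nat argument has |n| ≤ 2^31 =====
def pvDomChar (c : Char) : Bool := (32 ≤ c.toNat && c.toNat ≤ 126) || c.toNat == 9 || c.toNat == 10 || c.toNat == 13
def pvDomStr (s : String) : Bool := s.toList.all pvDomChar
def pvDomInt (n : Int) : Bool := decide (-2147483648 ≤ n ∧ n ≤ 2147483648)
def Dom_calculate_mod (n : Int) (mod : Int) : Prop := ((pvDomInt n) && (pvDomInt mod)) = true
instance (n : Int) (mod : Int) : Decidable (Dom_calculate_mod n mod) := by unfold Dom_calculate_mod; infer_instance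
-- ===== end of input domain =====

-- B replaces A's per-iteration math.comb recomputations and from-scratch modular powers
-- by a single pass (in reversed index order) that updates the binomial coefficient and the
-- power of two incrementally; objective: faster.


-- ===== PORT A =====
-- Inside the loop 0 ≤ k ≤ n-1, so `.toNat` on k, n-1 and n-1-k is exact; math.comb = Nat.choose,
-- pow(2, e, mod) = PySem.Int.powMod.
def calculate_mod (n : Int) (mod : Int) : Int :=
  let result : Int := (PySem.List.pyRange 0 n 1).foldl (fun result k =>
      let sign : Int := (-1 : Int) ^ k.toNat
      let binomial1 : Int := ((n - 1).toNat.choose k.toNat : Int)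
      let exponent : Nat := (n - 1 - k).toNat.choose 2
      let power : Int := PySem.Int.powMod 2 exponent mod
      let term : Int := sign * binomial1 * power
      PySem.Int.mod (result + term) mod) 0
  PySem.Int.mod (result * n) mod

-- ===== PORT B =====
-- State (result, comb, power); comb = C(n-1,m) exactly, power = 2^C(m,2) reduced mod `mod`.
def calculate_mod_alt (n : Int) (mod : Int) : Int :=
  let st : Int × Int × Int := (PySem.List.pyRange 0 n 1).foldl (fun st m =>
      let result := st.1
      let comb := st.2.1
      let power := st.2.2
      let sign : Int := if PySem.Int.mod (n - 1 - m) 2 ≠ 0 then -1 else 1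
      let result' := PySem.Int.mod (result + sign * comb * power) mod
      let comb' := PySem.Int.floordiv (comb * (n - 1 - m)) (m + 1)
      let power' := PySem.Int.mod (power * PySem.Int.powMod 2 m.toNat mod) mod
      (result', comb', power')) (0, 1, 1)
  PySem.Int.mod (st.1 * n) mod

-- ===== PRECONDITION & SPEC =====
-- Pre_ excludes exactly mod = 0, where Python A raises (ZeroDivisionError from `% 0` for n ≤ 0,
-- ValueError from pow(…, 0) for n ≥ 1); B raises there too.
def Pre_calculate_mod (n : Int) (mod : Int) : Prop := mod ≠ 0
instance (n : Int) (mod : Int) : Decidable (Pre_calculate_mod n mod) := by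
  unfold Pre_calculate_mod; infer_instance
def pvWitness_calculate_mod : Int × Int := (6, 1000000007)

def Spec_calculate_mod (n : Int) (mod : Int) (out : Int) : Prop := out = calculate_mod_alt n mod
instance (n : Int) (mod : Int) (out : Int) : Decidable (Spec_calculate_mod n mod out) := by
  unfold Spec_calculate_mod; infer_instance

-- ===== CLAIM (what is proved, stated in full; the proofs are below) =====
def Claim_equal_calculate_mod : Prop := ∀ (n : Int) (mod : Int), Dom_calculate_mod n mod →
  Pre_calculate_mod n mod → Spec_calculate_mod n mod (calculate_mod n mod)

-- ===== LEMMAS AND PROOFS =====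

-- Python-mod (floor mod) congruence toolkit
theorem pv_dvd_sub_mod (a m : Int) : m ∣ (a - PySem.Int.mod a m) := by
  refine ⟨PySem.Int.floordiv a m, ?_⟩
  have h := PySem.Int.floordiv_mul_add_mod a m
  linarith [mul_comm m (PySem.Int.floordiv a m)]

theorem pv_mod_congr {m : Int} (hm : m ≠ 0) {a b : Int} (h : m ∣ a - b) :
    PySem.Int.mod a m = PySem.Int.mod b m := by
  have d : m ∣ (PySem.Int.mod a m - PySem.Int.mod b m) := by
    have h1 := pv_dvd_sub_mod a m
    have h2 := pv_dvd_sub_mod b m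
    have e : PySem.Int.mod a m - PySem.Int.mod b m
        = (a - b) - (a - PySem.Int.mod a m) + (b - PySem.Int.mod b m) := by ring
    rw [e]; exact dvd_add (dvd_sub h h1) h2
  have hz : PySem.Int.mod a m - PySem.Int.mod b m = 0 := by
    rcases lt_or_gt_of_ne hm with hneg | hpos
    · have b1 := PySem.Int.mod_neg_bounds a hneg
      have b2 := PySem.Int.mod_neg_bounds b hneg
      exact Int.eq_zero_of_abs_lt_dvd ((Int.neg_dvd).mpr d)
        (by rw [abs_lt]; constructor <;> [linarith [b1.1, b2.2]; linarith [b1.2, b2.1]])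
    · have b1n := PySem.Int.mod_nonneg a hpos
      have b1l := PySem.Int.mod_lt a hpos
      have b2n := PySem.Int.mod_nonneg b hpos
      have b2l := PySem.Int.mod_lt b hpos
      exact Int.eq_zero_of_abs_lt_dvd d (by rw [abs_lt]; omega)
  linarith

theorem pv_mod_zero {m : Int} : PySem.Int.mod 0 m = 0 := by simp [PySem.Int.mod]

theorem pv_mod_add_left {m : Int} (hm : m ≠ 0) (a b : Int) :
    PySem.Int.mod (PySem.Int.mod a m + b) m = PySem.Int.mod (a + b) m :=
  pv_mod_congr hm (by
    have := pv_dvd_sub_mod a m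
    have e : PySem.Int.mod a m + b - (a + b) = -(a - PySem.Int.mod a m) := by ring
    rw [e]; exact dvd_neg.mpr this)

theorem pv_mod_mul_left {m : Int} (hm : m ≠ 0) (a c : Int) :
    PySem.Int.mod (PySem.Int.mod a m * c) m = PySem.Int.mod (a * c) m :=
  pv_mod_congr hm (by
    have := pv_dvd_sub_mod a m
    have e : PySem.Int.mod a m * c - a * c = -((a - PySem.Int.mod a m) * c) := by ring
    rw [e]; exact dvd_neg.mpr (this.mul_right c))

-- exact summands
def pvTA (n' k : Nat) : Int := (-1 : Int) ^ k * ((n' - 1).choose k : Int) * 2 ^ ((n' - 1 - k).choose 2)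
def pvTB (n' m : Nat) : Int := (-1 : Int) ^ (n' - 1 - m) * ((n' - 1).choose m : Int) * 2 ^ (m.choose 2)

-- the two loop bodies, at a natural loop index
def pvStepA (n' : Nat) (mod : Int) (result : Int) (k : Int) : Int :=
  PySem.Int.mod (result + (-1 : Int) ^ k.toNat * (((n' : Int) - 1).toNat.choose k.toNat : Int)
    * PySem.Int.powMod 2 ((((n' : Int)) - 1 - k).toNat.choose 2) mod) mod

def pvStepB (n' : Nat) (mod : Int) (st : Int × Int × Int) (m : Int) : Int × Int × Int :=
  (PySem.Int.mod (st.1 + (if PySem.Int.mod ((n' : Int) - 1 - m) 2 ≠ 0 then (-1 : Int) else 1) * st.2.1 * st.2.2) mod,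
   PySem.Int.floordiv (st.2.1 * ((n' : Int) - 1 - m)) (m + 1),
   PySem.Int.mod (st.2.2 * PySem.Int.powMod 2 m.toNat mod) mod)

-- A's loop computes the reduced partial sums of pvTA
theorem pvA_inv (n' : Nat) {mod : Int} (hm : mod ≠ 0) (j : Nat) (hj : j ≤ n') :
    (List.range j).foldl (fun s (k : Nat) => pvStepA n' mod s (k : Int)) 0
    = PySem.Int.mod (∑ k ∈ Finset.range j, pvTA n' k) mod := by
  induction j with
  | zero => simp [pv_mod_zero]
  | succ j ih =>
    rw [List.range_succ, List.foldl_append, ih (by omega)]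
    simp only [List.foldl_cons, List.foldl_nil]
    unfold pvStepA
    rw [pv_mod_add_left hm]
    refine pv_mod_congr hm ?_
    have h1 : ((j : Int)).toNat = j := by simp
    have h2 : (((n' : Int)) - 1).toNat = n' - 1 := by omega
    have h3 : (((n' : Int)) - 1 - (j : Int)).toNat = n' - 1 - j := by omega
    rw [Finset.sum_range_succ, h1, h2, h3]
    have e : ∀ s : Int, s + (-1 : Int) ^ j * ((n' - 1).choose j : Int)
        * PySem.Int.powMod 2 ((n' - 1 - j).choose 2) mod - (s + pvTA n' j)
        = (-1 : Int) ^ j * ((n' - 1).choose j : Int)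
          * (PySem.Int.mod (2 ^ ((n' - 1 - j).choose 2)) mod - 2 ^ ((n' - 1 - j).choose 2)) := by
      intro s; simp [pvTA, PySem.Int.powMod]; ring
    rw [e]
    refine Dvd.dvd.mul_left ?_ _
    have hd := pv_dvd_sub_mod ((2 : Int) ^ ((n' - 1 - j).choose 2)) mod
    have e2 : PySem.Int.mod (2 ^ ((n' - 1 - j).choose 2)) mod - 2 ^ ((n' - 1 - j).choose 2)
        = -((2 : Int) ^ ((n' - 1 - j).choose 2)
            - PySem.Int.mod (2 ^ ((n' - 1 - j).choose 2)) mod) := by ring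
    rw [e2]; exact dvd_neg.mpr hd

-- B's loop invariant: reduced partial sums of pvTB, exact binomial, congruent power
theorem pvB_inv (n' : Nat) {mod : Int} (hm : mod ≠ 0) (j : Nat) (hj : j ≤ n') :
    ∃ p : Int,
      (List.range j).foldl (fun st (k : Nat) => pvStepB n' mod st (k : Int)) (0, 1, 1)
      = (PySem.Int.mod (∑ k ∈ Finset.range j, pvTB n' k) mod, ((n' - 1).choose j : Int), p)
      ∧ mod ∣ p - 2 ^ (j.choose 2) := by
  induction j with
  | zero => exact ⟨1, by simp [pv_mod_zero], by simp⟩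
  | succ j ih =>
    obtain ⟨p, hfold, hp⟩ := ih (by omega)
    rw [List.range_succ, List.foldl_append, hfold]
    simp only [List.foldl_cons, List.foldl_nil]
    unfold pvStepB
    have hcast : ((n' : Int)) - 1 - (j : Int) = ((n' - 1 - j : Nat) : Int) := by
      omega
    have hsign : (if PySem.Int.mod ((n' : Int) - 1 - (j : Int)) 2 ≠ 0 then (-1 : Int) else 1)
        = (-1 : Int) ^ (n' - 1 - j) := by
      rw [hcast]
      have hmod : PySem.Int.mod ((n' - 1 - j : Nat) : Int) 2 = (((n' - 1 - j) % 2 : Nat) : Int) := by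
        exact_mod_cast PySem.Int.mod_natCast (n' - 1 - j) 2
      rw [hmod]
      rcases Nat.even_or_odd (n' - 1 - j) with he | ho
      · have he' := Nat.even_iff.mp he
        simp [he', Even.neg_one_pow he]
      · have ho' := Nat.odd_iff.mp ho
        simp [ho', Odd.neg_one_pow ho]
    refine ⟨PySem.Int.mod (p * PySem.Int.powMod 2 ((j : Int)).toNat mod) mod, ?_, ?_⟩
    · refine Prod.ext ?_ (Prod.ext ?_ rfl)
      · -- result component
        simp only
        rw [hsign, pv_mod_add_left hm, Finset.sum_range_succ]
        refine pv_mod_congr hm ?_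
        have e : ∀ s : Int, s + (-1 : Int) ^ (n' - 1 - j) * ((n' - 1).choose j : Int) * p
            - (s + pvTB n' j)
            = (-1 : Int) ^ (n' - 1 - j) * ((n' - 1).choose j : Int) * (p - 2 ^ (j.choose 2)) := by
          intro s; simp [pvTB]; ring
        rw [e]
        exact hp.mul_left _
      · -- comb component
        simp only
        rw [hcast]
        have e1 : (((n' - 1).choose j : Nat) : Int) * ((n' - 1 - j : Nat) : Int)
            = (((n' - 1).choose j * (n' - 1 - j) : Nat) : Int) := by push_cast; ring
        rw [e1]
        have hj1 : ((j : Int)) + 1 = ((j + 1 : Nat) : Int) := by push_cast; ring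
        rw [hj1, PySem.Int.floordiv_natCast]
        congr 1
        rw [← Nat.choose_succ_right_eq]
        exact Nat.mul_div_cancel _ (by omega)
    · -- power component
      have h1 : ((j : Int)).toNat = j := by simp
      rw [h1]
      have step1 : mod ∣ PySem.Int.mod (p * PySem.Int.powMod 2 j mod) mod
          - p * PySem.Int.powMod 2 j mod := by
        have hd := pv_dvd_sub_mod (p * PySem.Int.powMod 2 j mod) mod
        have e : PySem.Int.mod (p * PySem.Int.powMod 2 j mod) mod - p * PySem.Int.powMod 2 j mod
            = -(p * PySem.Int.powMod 2 j mod - PySem.Int.mod (p * PySem.Int.powMod 2 j mod) mod) := by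
          ring
        rw [e]; exact dvd_neg.mpr hd
      have step2 : mod ∣ p * PySem.Int.powMod 2 j mod - p * 2 ^ j := by
        have hpw : mod ∣ PySem.Int.powMod 2 j mod - 2 ^ j := by
          have hd := pv_dvd_sub_mod ((2 : Int) ^ j) mod
          have e : PySem.Int.powMod 2 j mod - 2 ^ j
              = -((2 : Int) ^ j - PySem.Int.mod ((2 : Int) ^ j) mod) := by
            simp [PySem.Int.powMod]
          rw [e]; exact dvd_neg.mpr hd
        have e : p * PySem.Int.powMod 2 j mod - p * 2 ^ j
            = (PySem.Int.powMod 2 j mod - 2 ^ j) * p := by ring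
        rw [e]; exact hpw.mul_right p
      have step3 : mod ∣ p * 2 ^ j - 2 ^ ((j + 1).choose 2) := by
        have hch : (j + 1).choose 2 = j.choose 2 + j := by
          rw [Nat.choose_succ_succ]
          simp [Nat.choose_one_right, Nat.add_comm]
        rw [hch, pow_add]
        have e : p * 2 ^ j - 2 ^ (j.choose 2) * 2 ^ j = (p - 2 ^ (j.choose 2)) * 2 ^ j := by ring
        rw [e]; exact hp.mul_right _
      have e : PySem.Int.mod (p * PySem.Int.powMod 2 j mod) mod - 2 ^ ((j + 1).choose 2)
          = (PySem.Int.mod (p * PySem.Int.powMod 2 j mod) mod - p * PySem.Int.powMod 2 j mod)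
            + (p * PySem.Int.powMod 2 j mod - p * 2 ^ j)
            + (p * 2 ^ j - 2 ^ ((j + 1).choose 2)) := by ring
      rw [e]
      exact dvd_add (dvd_add step1 step2) step3

-- the two exact sums coincide (reversal of the summation index)
theorem pv_sum_eq (n' : Nat) :
    ∑ k ∈ Finset.range n', pvTA n' k = ∑ k ∈ Finset.range n', pvTB n' k := by
  rw [← Finset.sum_range_reflect (pvTB n') n']
  refine Finset.sum_congr rfl ?_
  intro k hk
  rw [Finset.mem_range] at hk
  unfold pvTA pvTB
  have h1 : n' - 1 - (n' - 1 - k) = k := by omega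
  have h2 : (n' - 1).choose (n' - 1 - k) = (n' - 1).choose k := Nat.choose_symm (by omega)
  rw [h1, h2]

-- ===== VERDICT (by name: the statement is the Claim_ definition above) =====
theorem calculate_mod_spec : Claim_equal_calculate_mod := by
  intro n mod _ hm
  unfold Spec_calculate_mod calculate_mod calculate_mod_alt
  by_cases hn : n ≤ 0
  · have hr : PySem.List.pyRange 0 n 1 = [] := by simp [PySem.List.pyRange]; omega
    simp [hr]
  · obtain ⟨n', rfl⟩ : ∃ n' : Nat, n = (n' : Int) := ⟨n.toNat, by omega⟩
    
    rw [show PySem.List.pyRange 0 (n' : Int) 1 = (List.range n').map (fun k : Nat => (k : Int)) from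
      PySem.List.pyRange_zero_natCast n']
    simp only [List.foldl_map]
    obtain ⟨p, hfold, _⟩ := pvB_inv n' hm n' le_rfl
    have hA := pvA_inv n' hm n' le_rfl
    show PySem.Int.mod
        ((List.range n').foldl (fun s (k : Nat) => pvStepA n' mod s (k : Int)) 0 * (n' : Int)) mod
      = PySem.Int.mod
        (((List.range n').foldl (fun st (k : Nat) => pvStepB n' mod st (k : Int)) (0, 1, 1)).1 * (n' : Int)) mod
    rw [hA, hfold]
    simp only
    rw [pv_mod_mul_left hm, pv_mod_mul_left hm, pv_sum_eq n']
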